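-- pv_equiv track=rewrite | github.com/DanielMadan2001/Python-Exercises | zigZag.py | solution
-- ===== SOURCE A (Python) =====
-- def solution(numbers):
--     # array that will be populated with 0s and 1s
--     return_arr = []
--     # iterate through the second to second-last elements in numbers
--     for i in range(1, len(numbers) - 1):
--         # if left and right elements of numbers[i] are larger than it, add 1 to return_arr
--         if (numbers[i - 1] < numbers[i]) and (numbers[i + 1] < numbers[i]):
--             return_arr.append(1)
--         # if left and right elements of numbers[i] are smaller than it, add 1 to return_arr
--         elif (numbers[i - 1] > numbers[i]) and (numbers[i + 1] > numbers[i]):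
--             return_arr.append(1)
--         # otherwise, add 1 to return_arr
--         else:
--             return_arr.append(0)
--     # return the finalized return_arr
--     return return_arr
-- ===== SOURCE B (Python) =====
-- def solution(numbers):
--     # difference table, then a strict sign change between adjacent differences marks a peak/valley
--     diffs = [b - a for a, b in zip(numbers, numbers[1:])]
--     return [1 if x * y < 0 else 0 for x, y in zip(diffs, diffs[1:])]
-- ===== Notes on version B (the rewrite author's own statement) =====
-- stated objective: alternative
-- what changed: Replaces per-index neighbor comparisons over range(1,len-1) with a precomputed list of consecutive differences followed by a sign-change test on adjacent difference pairs.
import Mathlib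
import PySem

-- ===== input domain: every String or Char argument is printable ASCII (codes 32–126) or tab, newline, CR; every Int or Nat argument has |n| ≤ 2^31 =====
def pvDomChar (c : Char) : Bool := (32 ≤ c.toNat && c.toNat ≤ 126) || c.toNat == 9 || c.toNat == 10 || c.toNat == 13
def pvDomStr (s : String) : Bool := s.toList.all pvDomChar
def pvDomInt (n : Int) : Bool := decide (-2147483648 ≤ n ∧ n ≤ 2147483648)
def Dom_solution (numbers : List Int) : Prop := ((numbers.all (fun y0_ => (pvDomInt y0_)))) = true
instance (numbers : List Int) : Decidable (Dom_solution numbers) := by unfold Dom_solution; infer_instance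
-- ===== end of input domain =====

-- B builds the consecutive-difference table and marks strict sign changes; same O(n) cost, different decomposition.

-- ===== PORT A =====
-- A indexes numbers[i-1], numbers[i], numbers[i+1] for i in range(1, len-1); all indices are
-- in range there, so pyGetD's default is never used.
def solution (numbers : List Int) : List Int :=
  (PySem.List.pyRange 1 ((numbers.length : Int) - 1) 1).foldl
    (fun return_arr i =>
      if PySem.List.pyGetD numbers (i - 1) 0 < PySem.List.pyGetD numbers i 0 ∧
         PySem.List.pyGetD numbers (i + 1) 0 < PySem.List.pyGetD numbers i 0 then
        return_arr ++ [1]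
      else if PySem.List.pyGetD numbers (i - 1) 0 > PySem.List.pyGetD numbers i 0 ∧
              PySem.List.pyGetD numbers (i + 1) 0 > PySem.List.pyGetD numbers i 0 then
        return_arr ++ [1]
      else return_arr ++ [0])
    []

-- ===== PORT B =====
def solution_alt (numbers : List Int) : List Int :=
  let diffs := (numbers.zip (numbers.drop 1)).map (fun p => p.2 - p.1)
  (diffs.zip (diffs.drop 1)).map (fun p => if p.1 * p.2 < 0 then (1 : Int) else 0)

-- ===== PRECONDITION & SPEC =====
def Spec_solution (numbers : List Int) (out : List Int) : Prop := out = solution_alt numbers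
instance (numbers : List Int) (out : List Int) : Decidable (Spec_solution numbers out) := by unfold Spec_solution; infer_instance

-- ===== CLAIM (what is proved, stated in full; the proofs are below) =====
def Claim_equal_solution : Prop := ∀ (numbers : List Int), Dom_solution numbers → Spec_solution numbers (solution numbers)

-- ===== LEMMAS AND PROOFS =====

-- the per-cell equivalence: a strict peak or valley iff adjacent differences have opposite signs
theorem pv_cell (a b c : Int) :
    (if a < b ∧ c < b then (1 : Int) else if a > b ∧ c > b then 1 else 0)
      = (if (b - a) * (c - b) < 0 then (1 : Int) else 0) := by
  simp only [mul_neg_iff]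
  split_ifs <;> omega

theorem pv_A_eq_map (numbers : List Int) :
    solution numbers
      = (PySem.List.pyRange 1 ((numbers.length : Int) - 1) 1).map
          (fun i =>
            if PySem.List.pyGetD numbers (i - 1) 0 < PySem.List.pyGetD numbers i 0 ∧
               PySem.List.pyGetD numbers (i + 1) 0 < PySem.List.pyGetD numbers i 0 then (1 : Int)
            else if PySem.List.pyGetD numbers (i - 1) 0 > PySem.List.pyGetD numbers i 0 ∧
                    PySem.List.pyGetD numbers (i + 1) 0 > PySem.List.pyGetD numbers i 0 then 1
            else 0) := by
  unfold solution
  suffices h : ∀ (l acc : List Int),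
      l.foldl
        (fun return_arr i =>
          if PySem.List.pyGetD numbers (i - 1) 0 < PySem.List.pyGetD numbers i 0 ∧
             PySem.List.pyGetD numbers (i + 1) 0 < PySem.List.pyGetD numbers i 0 then
            return_arr ++ [1]
          else if PySem.List.pyGetD numbers (i - 1) 0 > PySem.List.pyGetD numbers i 0 ∧
                  PySem.List.pyGetD numbers (i + 1) 0 > PySem.List.pyGetD numbers i 0 then
            return_arr ++ [1]
          else return_arr ++ [0]) acc
        = acc ++ l.map (fun i =>
            if PySem.List.pyGetD numbers (i - 1) 0 < PySem.List.pyGetD numbers i 0 ∧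
               PySem.List.pyGetD numbers (i + 1) 0 < PySem.List.pyGetD numbers i 0 then (1 : Int)
            else if PySem.List.pyGetD numbers (i - 1) 0 > PySem.List.pyGetD numbers i 0 ∧
                    PySem.List.pyGetD numbers (i + 1) 0 > PySem.List.pyGetD numbers i 0 then 1
            else 0) by
    rw [h]; simp
  intro l
  induction l with
  | nil => intro acc; simp
  | cons x t ih =>
    intro acc
    simp only [List.foldl_cons, List.map_cons]
    rw [ih]
    split_ifs <;> simp

-- ===== VERDICT (by name: the statement is the Claim_ definition above) =====
theorem solution_spec : Claim_equal_solution := by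
  intro numbers _
  unfold Spec_solution solution_alt
  rw [pv_A_eq_map]
  apply List.ext_getElem
  · simp [PySem.List.length_pyRange_one, List.length_zip]
  · intro k hk1 hk2
    simp only [List.getElem_map, PySem.List.getElem_pyRange_one, List.getElem_zip,
      List.getElem_drop]
    have hlen : 1 + (1 + k) < numbers.length := by
      simp [PySem.List.length_pyRange_one] at hk1; omega
    have g0 : PySem.List.pyGetD numbers ((1 : Int) + k - 1) 0 = numbers[k]'(by omega) := by
      have e : ((1 : Int) + k - 1) = ((k : Nat) : Int) := by ring
      rw [e, PySem.List.pyGetD_eq_getElem numbers _ (by exact_mod_cast Nat.zero_le _)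
        (by exact_mod_cast (show k < numbers.length by omega))]
      simp
    have g1 : PySem.List.pyGetD numbers ((1 : Int) + k) 0 = numbers[1 + k]'(by omega) := by
      have e : ((1 : Int) + k) = ((1 + k : Nat) : Int) := by push_cast; ring
      rw [e, PySem.List.pyGetD_eq_getElem numbers _ (by exact_mod_cast Nat.zero_le _)
        (by exact_mod_cast (show 1 + k < numbers.length by omega))]
      congr 1
    have g2 : PySem.List.pyGetD numbers ((1 : Int) + k + 1) 0 = numbers[1 + (1 + k)]'(by omega) := by
      have e : ((1 : Int) + k + 1) = ((1 + (1 + k) : Nat) : Int) := by push_cast; ring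
      rw [e, PySem.List.pyGetD_eq_getElem numbers _ (by exact_mod_cast Nat.zero_le _)
        (by exact_mod_cast hlen)]
      congr 1
    rw [g0, g1, g2]
    exact pv_cell (numbers[k]'(by omega)) (numbers[1 + k]'(by omega)) (numbers[1 + (1 + k)]'(by omega))
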